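-- pv_equiv track=rewrite | github.com/PJ-Samuels/CS-131 | ps6.py | do_parts_cover_set
-- ===== SOURCE A (Python) =====
-- def do_parts_cover_set(s, p):
--         for i in s:
--                 f = 0
--                 for j in range(len(p)):
--                         if i in p[j]:
--                                 f = 1
--                 if f==0:
--                         return False
--         return True
-- ===== SOURCE B (Python) =====
-- def do_parts_cover_set(s, p):
--     need = set(s)
--     for q in p:
--         need -= set(q)
--         if not need:
--             return True
--     return not need
-- ===== Notes on version B (the rewrite author's own statement) =====
-- stated objective: alternative
-- what changed: Inverts the traversal: instead of scanning every part for each element of s (element-outer, list membership), B builds a set of still-uncovered elements once and subtracts each part from it, returning True as soon as it is empty.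
import Mathlib
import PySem

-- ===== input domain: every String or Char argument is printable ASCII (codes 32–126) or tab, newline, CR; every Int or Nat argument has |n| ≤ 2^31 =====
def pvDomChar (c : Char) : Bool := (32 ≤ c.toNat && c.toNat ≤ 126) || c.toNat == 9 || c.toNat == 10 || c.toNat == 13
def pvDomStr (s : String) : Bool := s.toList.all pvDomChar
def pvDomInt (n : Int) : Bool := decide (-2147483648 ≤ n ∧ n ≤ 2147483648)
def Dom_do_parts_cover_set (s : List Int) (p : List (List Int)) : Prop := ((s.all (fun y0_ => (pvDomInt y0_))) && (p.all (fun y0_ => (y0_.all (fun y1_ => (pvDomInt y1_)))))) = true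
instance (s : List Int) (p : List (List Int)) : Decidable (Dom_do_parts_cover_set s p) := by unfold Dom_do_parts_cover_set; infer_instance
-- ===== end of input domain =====

-- B replaces A's element-outer scan (list membership in every part, for every element)
-- by a parts-outer loop shrinking a set of still-uncovered elements; objective: alternative.

-- ===== PORT A =====
-- for i in s: f = 0; for j in range(len(p)): if i in p[j]: f = 1; if f == 0: return False; return True
def do_parts_cover_set (s : List Int) (p : List (List Int)) : Bool :=
  match s with
  | [] => true
  | i :: rest =>
    let f : Int := (PySem.List.pyRange 0 (p.length : Int) 1).foldl
      (fun f j => if (PySem.List.pyGetD p j []).contains i then 1 else f) 0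
    if f == 0 then false else do_parts_cover_set rest p

-- ===== PORT B =====
-- need = set(s); for q in p: need -= set(q); if not need: return True; return not need
def coverLoop (need : PySem.Set Int) (p : List (List Int)) : Bool :=
  match p with
  | [] => need.isEmpty
  | q :: rest =>
    let need' := PySem.Set.diff need (PySem.Set.ofList q)
    if need'.isEmpty then true else coverLoop need' rest

def do_parts_cover_set_alt (s : List Int) (p : List (List Int)) : Bool :=
  coverLoop (PySem.Set.ofList s) p

-- ===== PRECONDITION & SPEC =====
def Spec_do_parts_cover_set (s : List Int) (p : List (List Int)) (out : Bool) : Prop := out = do_parts_cover_set_alt s p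
instance (s : List Int) (p : List (List Int)) (out : Bool) : Decidable (Spec_do_parts_cover_set s p out) := by unfold Spec_do_parts_cover_set; infer_instance

-- ===== CLAIM (what is proved, stated in full; the proofs are below) =====
def Claim_equal_do_parts_cover_set : Prop := ∀ (s : List Int) (p : List (List Int)), Dom_do_parts_cover_set s p → Spec_do_parts_cover_set s p (do_parts_cover_set s p)

-- ===== LEMMAS AND PROOFS =====

-- the inner flag fold of A: result is 1 iff some visited index hits, else the start value
theorem coverFold_eq (p : List (List Int)) (i : Int) (L : List Int) (a : Int) :
    L.foldl (fun f j => if (PySem.List.pyGetD p j []).contains i then 1 else f) a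
      = if ∃ j ∈ L, i ∈ PySem.List.pyGetD p j [] then 1 else a := by
  induction L generalizing a with
  | nil => simp
  | cons j L ih =>
    simp only [List.foldl_cons, ih]
    by_cases h1 : i ∈ PySem.List.pyGetD p j [] <;>
      by_cases h2 : ∃ j' ∈ L, i ∈ PySem.List.pyGetD p j' [] <;>
      simp_all

-- the index range of A's inner loop reaches exactly the parts of p
theorem exists_idx_iff (p : List (List Int)) (i : Int) :
    (∃ j ∈ PySem.List.pyRange 0 (p.length : Int) 1, i ∈ PySem.List.pyGetD p j []) ↔
      ∃ q ∈ p, i ∈ q := by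
  constructor
  · rintro ⟨j, hjmem, hj⟩
    rw [PySem.List.mem_pyRange_one] at hjmem
    obtain ⟨k, rfl⟩ := Int.eq_ofNat_of_zero_le hjmem.1
    have hk : k < p.length := by exact_mod_cast hjmem.2
    rw [PySem.List.pyGetD_natCast] at hj
    refine ⟨p[k], List.getElem_mem _, ?_⟩
    rwa [List.getD_eq_getElem _ _ hk] at hj
  · rintro ⟨q, hq, hqi⟩
    obtain ⟨k, hk, rfl⟩ := List.getElem_of_mem hq
    refine ⟨(k : Int), ?_, ?_⟩
    · rw [PySem.List.mem_pyRange_one]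
      exact ⟨Int.natCast_nonneg k, by exact_mod_cast hk⟩
    · rw [PySem.List.pyGetD_natCast, List.getD_eq_getElem _ _ hk]
      exact hqi

theorem portA_eq (s : List Int) (p : List (List Int)) :
    do_parts_cover_set s p = s.all (fun i => p.any (fun q => q.contains i)) := by
  induction s with
  | nil => rfl
  | cons i rest ih =>
    simp only [do_parts_cover_set, coverFold_eq, List.all_cons, ih]
    by_cases hany : p.any (fun q => q.contains i) = true
    · have hc : ∃ q ∈ p, i ∈ q := by
        simp only [List.any_eq_true] at hany
        obtain ⟨q, hq, hi⟩ := hany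
        exact ⟨q, hq, by simpa using hi⟩
      have hC := (exists_idx_iff p i).2 hc
      rw [if_pos hC, hany]
      norm_num
    · have hC : ¬ (∃ j ∈ PySem.List.pyRange 0 (p.length : Int) 1, i ∈ PySem.List.pyGetD p j []) := by
        intro h
        obtain ⟨q, hq, hi⟩ := (exists_idx_iff p i).1 h
        exact hany (List.any_eq_true.2 ⟨q, hq, by simpa using hi⟩)
      rw [Bool.not_eq_true] at hany
      rw [if_neg hC, hany]
      norm_num

theorem coverLoop_eq (p : List (List Int)) (need : PySem.Set Int) :
    coverLoop need p = need.all (fun x => p.any (fun q => q.contains x)) := by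
  induction p generalizing need with
  | nil => cases need <;> simp [coverLoop]
  | cons q rest ih =>
    show (if (PySem.Set.diff need (PySem.Set.ofList q)).isEmpty then true
          else coverLoop (PySem.Set.diff need (PySem.Set.ofList q)) rest)
        = need.all (fun x => (q :: rest).any (fun r => r.contains x))
    by_cases he : (PySem.Set.diff need (PySem.Set.ofList q)).isEmpty = true
    · have he' := he
      rw [List.isEmpty_iff] at he'
      have hall : need.all (fun x => (q :: rest).any (fun r => r.contains x)) = true := by
        simp only [List.all_eq_true]
        intro x hx
        have hxq : x ∈ q := by
          by_contra hxq
          have hmem : x ∈ PySem.Set.diff need (PySem.Set.ofList q) :=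
            (PySem.Set.mem_diff _ _ _).2 ⟨hx, by simpa [PySem.Set.mem_ofList] using hxq⟩
          simp [he'] at hmem
        simp [List.any_cons, hxq]
      rw [if_pos he, hall]
    · rw [if_neg he, ih, Bool.eq_iff_iff, List.all_eq_true, List.all_eq_true]
      constructor
      · intro h x hx
        simp only [List.any_cons]
        by_cases hxq : x ∈ q
        · simp [hxq]
        · have hmem : x ∈ PySem.Set.diff need (PySem.Set.ofList q) :=
            (PySem.Set.mem_diff _ _ _).2 ⟨hx, by simpa [PySem.Set.mem_ofList] using hxq⟩
          have hr := h x hmem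
          simp only [Bool.or_eq_true]
          exact Or.inr hr
      · intro h x hx
        obtain ⟨hxn, hxq⟩ := (PySem.Set.mem_diff _ _ _).1 hx
        have hx' := h x hxn
        rw [PySem.Set.mem_ofList] at hxq
        simp only [List.any_cons] at hx'
        simpa [hxq] using hx'

theorem portB_eq (s : List Int) (p : List (List Int)) :
    do_parts_cover_set_alt s p = s.all (fun i => p.any (fun q => q.contains i)) := by
  rw [do_parts_cover_set_alt, coverLoop_eq, Bool.eq_iff_iff, List.all_eq_true, List.all_eq_true]
  constructor <;> intro h x hx
  · exact h x ((PySem.Set.mem_ofList s x).2 hx)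
  · exact h x ((PySem.Set.mem_ofList s x).1 hx)

-- ===== VERDICT (by name: the statement is the Claim_ definition above) =====
theorem do_parts_cover_set_spec : Claim_equal_do_parts_cover_set := by
  intro s p _
  unfold Spec_do_parts_cover_set
  rw [portA_eq, portB_eq]
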